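-- pv_equiv track=rewrite | github.com/Woody-Woo/nri-generator | app/app.py | conversation_history_to_messages
-- ===== SOURCE A (Python) =====
-- def conversation_history_to_messages(conversation_history):
--     messages = []
--
--     for x, _ in conversation_history:
--         if x.startswith("user:"):
--             messages.append({"role": "user", "content": x[5:]})
--         elif x.startswith("assistant:"):
--             messages.append({"role": "assistant", "content": x[10:]})
--         elif x.startswith("system:"):
--             messages.append({"role": "system", "content": x[8:]})
--
--     return messages
-- ===== SOURCE B (Python) =====
-- ROLES = {"user", "assistant", "system"}
--
-- def conversation_history_to_messages(conversation_history):
--     parts = ((x.partition(":")) for x, _ in conversation_history)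
--     return [{"role": r, "content": c} for r, sep, c in parts if sep and r in ROLES]
-- ===== Notes on version B (the rewrite author's own statement) =====
-- stated objective: idiomatic
-- what changed: Instead of testing hard-coded prefixes with if/elif and slicing by literal offsets, B splits each item at its first colon with str.partition and filters by set membership of the head, so no prefix comparison or slice offset appears at all.
-- intended difference: On inputs containing an item whose first component starts with 'system:' and is at least 8 characters long, A slices x[8:] (dropping the first content character, since len('system:') is 7) while B returns everything after the colon (x[7:]), the full content, which is the intended value. — e.g. on conversation_history_to_messages([("system:ab", "r")]): A returns [[("role", "system"), ("content", "b")]], B returns [[("role", "system"), ("content", "ab")]]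
import Mathlib
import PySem

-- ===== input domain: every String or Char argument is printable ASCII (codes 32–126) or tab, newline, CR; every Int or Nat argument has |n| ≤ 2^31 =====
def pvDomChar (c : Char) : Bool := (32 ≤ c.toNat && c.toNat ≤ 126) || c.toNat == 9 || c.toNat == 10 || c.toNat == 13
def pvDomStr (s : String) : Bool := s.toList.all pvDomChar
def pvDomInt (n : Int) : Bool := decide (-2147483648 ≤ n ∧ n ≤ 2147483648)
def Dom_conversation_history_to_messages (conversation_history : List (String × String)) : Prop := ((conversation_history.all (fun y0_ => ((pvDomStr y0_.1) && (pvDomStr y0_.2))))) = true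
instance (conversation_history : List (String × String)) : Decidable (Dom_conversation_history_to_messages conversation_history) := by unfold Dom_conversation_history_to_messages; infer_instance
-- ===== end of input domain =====

-- B splits each item at its first colon (str.partition) and filters by set membership of
-- the head, instead of A's if/elif prefix cascade with literal slice offsets; where A
-- slices "system:"-items by 8 (off-by-one, the prefix is 7 chars) B returns everything
-- after the colon.

-- ===== PORT A =====
def conversation_history_to_messages (conversation_history : List (String × String)) : List (List (String × String)) :=
  conversation_history.foldl (fun messages px =>
    let x := px.1
    if PySem.Str.startswith x "user:" then
      messages ++ [[("role", "user"), ("content", PySem.Str.slice x (some 5) none)]]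
    else if PySem.Str.startswith x "assistant:" then
      messages ++ [[("role", "assistant"), ("content", PySem.Str.slice x (some 10) none)]]
    else if PySem.Str.startswith x "system:" then
      messages ++ [[("role", "system"), ("content", PySem.Str.slice x (some 8) none)]]
    else messages) []

-- ===== PORT B =====
-- hand port of Python's str.partition(":") restricted to what B uses: the head before the
-- first ':' and the tail after it, or none when no ':' occurs (exact: Python's partition
-- returns (x, "", "") then, and B's `if sep` filter drops that case).
def pvPartitionColon : List Char → Option (List Char × List Char)
  | [] => none
  | c :: t =>
      if c = ':' then some ([], t)
      else match pvPartitionColon t with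
        | some (h, r) => some (c :: h, r)
        | none => none

def pvRoles : List String := ["user", "assistant", "system"]

def conversation_history_to_messages_alt (conversation_history : List (String × String)) : List (List (String × String)) :=
  conversation_history.filterMap (fun px =>
    match pvPartitionColon px.1.toList with
    | some (r, c) =>
        if String.ofList r ∈ pvRoles then
          some [("role", String.ofList r), ("content", String.ofList c)]
        else none
    | none => none)

-- ===== PRECONDITION & SPEC =====
-- On items whose first component starts with "system:" and has length ≥ 8, A returns the
-- content with its first character dropped (x[8:], though the prefix is 7 chars long),
-- while B returns everything after the colon (x[7:]), the intended value.
def D_conversation_history_to_messages (conversation_history : List (String × String)) : Prop :=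
  ∃ p ∈ conversation_history, PySem.Str.startswith p.1 "system:" = true ∧ 8 ≤ p.1.length
instance (conversation_history : List (String × String)) : Decidable (D_conversation_history_to_messages conversation_history) := by unfold D_conversation_history_to_messages; infer_instance

def Spec_conversation_history_to_messages (conversation_history : List (String × String)) (out : List (List (String × String))) : Prop := ¬ D_conversation_history_to_messages conversation_history → out = conversation_history_to_messages_alt conversation_history
instance (conversation_history : List (String × String)) (out : List (List (String × String))) : Decidable (Spec_conversation_history_to_messages conversation_history out) := by unfold Spec_conversation_history_to_messages; infer_instance

def pvDiffWitness_conversation_history_to_messages : (List (String × String)) := [("system:ab", "r")]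
def pvDiffWitnessOut_conversation_history_to_messages : (List (List (String × String))) × (List (List (String × String))) :=
  ([[("role", "system"), ("content", "b")]], [[("role", "system"), ("content", "ab")]])

-- ===== CLAIM =====
def Claim_unchanged_conversation_history_to_messages : Prop := ∀ (conversation_history : List (String × String)), Dom_conversation_history_to_messages conversation_history → Spec_conversation_history_to_messages conversation_history (conversation_history_to_messages conversation_history)
def Claim_changed_conversation_history_to_messages : Prop := Dom_conversation_history_to_messages (pvDiffWitness_conversation_history_to_messages) ∧ D_conversation_history_to_messages (pvDiffWitness_conversation_history_to_messages) ∧ conversation_history_to_messages (pvDiffWitness_conversation_history_to_messages) = pvDiffWitnessOut_conversation_history_to_messages.1 ∧ conversation_history_to_messages_alt (pvDiffWitness_conversation_history_to_messages) = pvDiffWitnessOut_conversation_history_to_messages.2 ∧ pvDiffWitnessOut_conversation_history_to_messages.1 ≠ pvDiffWitnessOut_conversation_history_to_messages.2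
def Claim_exact_conversation_history_to_messages : Prop := ∀ (conversation_history : List (String × String)), Dom_conversation_history_to_messages conversation_history → D_conversation_history_to_messages conversation_history → conversation_history_to_messages conversation_history ≠ conversation_history_to_messages_alt conversation_history

-- ===== LEMMAS AND PROOFS =====

set_option maxRecDepth 10000

-- per-element contributions
def eltA (px : String × String) : List (List (String × String)) :=
  let x := px.1
  if PySem.Str.startswith x "user:" then [[("role", "user"), ("content", PySem.Str.slice x (some 5) none)]]
  else if PySem.Str.startswith x "assistant:" then [[("role", "assistant"), ("content", PySem.Str.slice x (some 10) none)]]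
  else if PySem.Str.startswith x "system:" then [[("role", "system"), ("content", PySem.Str.slice x (some 8) none)]]
  else []

def eltB (px : String × String) : List (List (String × String)) :=
  match pvPartitionColon px.1.toList with
  | some (r, c) =>
      if String.ofList r ∈ pvRoles then [[("role", String.ofList r), ("content", String.ofList c)]] else []
  | none => []

def pvBad (px : String × String) : Prop :=
  PySem.Str.startswith px.1 "system:" = true ∧ 8 ≤ px.1.length

theorem foldlA (acc : List (List (String × String))) (h : List (String × String)) :
    h.foldl (fun messages px =>
      let x := px.1
      if PySem.Str.startswith x "user:" then
        messages ++ [[("role", "user"), ("content", PySem.Str.slice x (some 5) none)]]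
      else if PySem.Str.startswith x "assistant:" then
        messages ++ [[("role", "assistant"), ("content", PySem.Str.slice x (some 10) none)]]
      else if PySem.Str.startswith x "system:" then
        messages ++ [[("role", "system"), ("content", PySem.Str.slice x (some 8) none)]]
      else messages) acc = acc ++ h.flatMap eltA := by
  induction h generalizing acc with
  | nil => simp
  | cons p t ih =>
    simp only [List.foldl_cons, List.flatMap_cons, ih, eltA]
    split_ifs <;> simp

theorem filterMapB (h : List (String × String)) :
    h.filterMap (fun px =>
      match pvPartitionColon px.1.toList with
      | some (r, c) =>
          if String.ofList r ∈ pvRoles then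
            some [("role", String.ofList r), ("content", String.ofList c)]
          else none
      | none => none) = h.flatMap eltB := by
  induction h with
  | nil => rfl
  | cons p t ih =>
    simp only [List.filterMap_cons, List.flatMap_cons, eltB]
    cases hp : pvPartitionColon p.1.toList with
    | none => simpa [hp] using ih
    | some rc =>
      obtain ⟨r, c⟩ := rc
      by_cases hm : String.ofList r ∈ pvRoles <;> simp [hm, ih]

-- pvPartitionColon spec
theorem part_of_eq (pre t : List Char) (hnc : ':' ∉ pre) :
    pvPartitionColon (pre ++ ':' :: t) = some (pre, t) := by
  induction pre with
  | nil => simp [pvPartitionColon]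
  | cons c cs ih =>
    have hc : c ≠ ':' := fun h => hnc (by simp [h])
    simp only [List.cons_append, pvPartitionColon, if_neg hc,
      ih (fun h => hnc (List.mem_cons_of_mem _ h))]

theorem part_some (l h r : List Char) (he : pvPartitionColon l = some (h, r)) :
    l = h ++ ':' :: r := by
  induction l generalizing h with
  | nil => simp [pvPartitionColon] at he
  | cons c t ih =>
    simp only [pvPartitionColon] at he
    by_cases hc : c = ':'
    · simp [hc] at he
      simp [hc, he.1, he.2]
    · simp only [if_neg hc] at he
      cases hp : pvPartitionColon t with
      | none => rw [hp] at he; simp at he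
      | some pr =>
        obtain ⟨h', r'⟩ := pr
        rw [hp] at he
        simp only [Option.some.injEq, Prod.mk.injEq] at he
        obtain ⟨he1, he2⟩ := he
        subst he2
        rw [← he1]
        simp [ih h' hp]

theorem startswith_part (x : String) (role t : List Char) (hnc : ':' ∉ role)
    (hs : x.toList = role ++ ':' :: t) :
    pvPartitionColon x.toList = some (role, t) := by
  rw [hs]; exact part_of_eq role t hnc

theorem slice_drop (x : String) (k : Nat) :
    PySem.Str.slice x (some (k : Int)) none = String.ofList (x.toList.drop k) := by
  apply String.ext
  simp [PySem.Str.toList_slice, PySem.Chars.slice_eq_listSlice, PySem.List.slice_from_natCast]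

theorem sw_decomp (x : String) (p : String) (hs : PySem.Str.startswith x p = true) :
    ∃ t, x.toList = p.toList ++ t := by
  obtain ⟨t, ht⟩ := (PySem.Chars.startswith_iff (s := x.toList) (p := p.toList)).mp hs
  exact ⟨t, ht.symm⟩

theorem elt_eq_of_not_bad (px : String × String) (hb : ¬ pvBad px) :
    eltA px = eltB px := by
  obtain ⟨x, y⟩ := px
  simp only [pvBad] at hb
  by_cases hu : PySem.Str.startswith x "user:" = true
  · obtain ⟨t, ht⟩ := sw_decomp x "user:" hu
    have hp : pvPartitionColon x.toList = some ("user".toList, t) :=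
      startswith_part x "user".toList t (by decide) (by rw [ht]; rfl)
    simp only [eltA, eltB, hu, if_true, hp]
    rw [show ((5:Int) = ((5:Nat):Int)) by norm_num, slice_drop, ht]
    simp [pvRoles]
  · by_cases ha : PySem.Str.startswith x "assistant:" = true
    · obtain ⟨t, ht⟩ := sw_decomp x "assistant:" ha
      have hp : pvPartitionColon x.toList = some ("assistant".toList, t) :=
        startswith_part x "assistant".toList t (by decide) (by rw [ht]; rfl)
      simp only [eltA, eltB, hu, ha, if_true, Bool.false_eq_true, if_false, hp]
      rw [show ((10:Int) = ((10:Nat):Int)) by norm_num, slice_drop, ht]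
      simp [pvRoles]
    · by_cases hsys : PySem.Str.startswith x "system:" = true
      · obtain ⟨t, ht⟩ := sw_decomp x "system:" hsys
        have hp : pvPartitionColon x.toList = some ("system".toList, t) :=
          startswith_part x "system".toList t (by decide) (by rw [ht]; rfl)
        have hlen : x.length < 8 := by
          by_contra hl
          exact hb ⟨hsys, by omega⟩
        have htl0 : t.length = 0 := by
          have h := congrArg List.length ht
          simp at h
          omega
        have htl : t = [] := List.eq_nil_of_length_eq_zero htl0
        subst htl
        simp only [eltA, eltB, hu, ha, hsys, if_true, Bool.false_eq_true, if_false, hp]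
        rw [show ((8:Int) = ((8:Nat):Int)) by norm_num, slice_drop, ht]
        simp [pvRoles]
      · -- no prefix matches: B must also drop the item
        simp only [eltA, eltB, hu, ha, hsys, Bool.false_eq_true, if_false]
        cases hp : pvPartitionColon x.toList with
        | none => rfl
        | some rc =>
          obtain ⟨r, c⟩ := rc
          have hx := part_some x.toList r c hp
          have hnm : String.ofList r ∉ pvRoles := by
            intro hmem
            simp only [pvRoles, List.mem_cons, List.not_mem_nil, or_false] at hmem
            rcases hmem with h | h | h
            · have hr : r = "user".toList := by simpa using congrArg String.toList h
              have hx' : x.toList = "user:".toList ++ c := by rw [hx, hr]; rfl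
              exact hu ((PySem.Chars.startswith_iff x.toList _).mpr ⟨c, hx'.symm⟩)
            · have hr : r = "assistant".toList := by simpa using congrArg String.toList h
              have hx' : x.toList = "assistant:".toList ++ c := by rw [hx, hr]; rfl
              exact ha ((PySem.Chars.startswith_iff x.toList _).mpr ⟨c, hx'.symm⟩)
            · have hr : r = "system".toList := by simpa using congrArg String.toList h
              have hx' : x.toList = "system:".toList ++ c := by rw [hx, hr]; rfl
              exact hsys ((PySem.Chars.startswith_iff x.toList _).mpr ⟨c, hx'.symm⟩)
          simp [hnm]

theorem elt_singletons_of_bad (px : String × String) (hbad : pvBad px) :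
    ∃ a b, eltA px = [a] ∧ eltB px = [b] ∧ a ≠ b := by
  obtain ⟨x, y⟩ := px
  obtain ⟨hs, hl⟩ := hbad
  simp only at hs hl
  obtain ⟨t, ht⟩ := sw_decomp x "system:" hs
  have hp : pvPartitionColon x.toList = some ("system".toList, t) :=
    startswith_part x "system".toList t (by decide) (by rw [ht]; rfl)
  have hu : ¬ PySem.Str.startswith x "user:" = true := by
    intro h
    obtain ⟨t1, e1⟩ := sw_decomp x "user:" h
    rw [ht] at e1
    simp at e1
  have ha : ¬ PySem.Str.startswith x "assistant:" = true := by
    intro h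
    obtain ⟨t1, e1⟩ := sw_decomp x "assistant:" h
    rw [ht] at e1
    simp at e1
  have hlt : x.length = t.length + 7 := by
    have h := congrArg List.length ht
    simp at h
    omega
  have hcne : PySem.Str.slice x (some 8) none ≠ String.ofList t := by
    intro h
    rw [show ((8:Int) = ((8:Nat):Int)) by norm_num, slice_drop] at h
    have h3 := congrArg List.length (by simpa using congrArg String.toList h : x.toList.drop 8 = t)
    simp at h3
    omega
  refine ⟨[("role", "system"), ("content", PySem.Str.slice x (some 8) none)],
          [("role", "system"), ("content", String.ofList t)], ?_, ?_, ?_⟩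
  · simp only [eltA, hu, ha, hs, Bool.false_eq_true, if_true, if_false]
  · simp only [eltB, hp]
    simp [pvRoles]
  · intro h
    simp only [List.cons.injEq, Prod.mk.injEq] at h
    exact hcne h.2.1.2

theorem flatMap_eq_of_no_bad (h : List (String × String)) (hc : ∀ p ∈ h, ¬ pvBad p) :
    h.flatMap eltA = h.flatMap eltB := by
  induction h with
  | nil => rfl
  | cons p t ih =>
    simp only [List.flatMap_cons]
    rw [elt_eq_of_not_bad p (hc p (by simp)), ih (fun q hq => hc q (by simp [hq]))]

theorem flatMap_ne_of_bad (h : List (String × String)) (hd : ∃ p ∈ h, pvBad p) :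
    h.flatMap eltA ≠ h.flatMap eltB := by
  induction h with
  | nil => simp at hd
  | cons p t ih =>
    simp only [List.flatMap_cons]
    by_cases hb : pvBad p
    · obtain ⟨a, b, ea, eb, hne⟩ := elt_singletons_of_bad p hb
      rw [ea, eb]
      simp only [List.singleton_append]
      intro h
      injection h with h1 _
      exact hne h1
    · have hdt : ∃ q ∈ t, pvBad q := by
        obtain ⟨q, hq, hbq⟩ := hd
        rcases List.mem_cons.mp hq with rfl | hqt
        · exact absurd hbq hb
        · exact ⟨q, hqt, hbq⟩
      rw [elt_eq_of_not_bad p hb]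
      intro h
      exact ih hdt (List.append_cancel_left h)

-- ===== VERDICT =====
theorem conversation_history_to_messages_spec : Claim_unchanged_conversation_history_to_messages := by
  intro h _ hnd
  unfold conversation_history_to_messages conversation_history_to_messages_alt
  rw [foldlA, filterMapB]
  exact flatMap_eq_of_no_bad h (fun p hp hb => hnd ⟨p, hp, hb⟩)

theorem conversation_history_to_messages_changed : Claim_changed_conversation_history_to_messages := by
  unfold Claim_changed_conversation_history_to_messages; decide

theorem conversation_history_to_messages_tight : Claim_exact_conversation_history_to_messages := by
  intro h _ hd
  unfold conversation_history_to_messages conversation_history_to_messages_alt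
  rw [foldlA, filterMapB]
  simp only [List.nil_append]
  exact flatMap_ne_of_bad h hd
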